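-- pv_equiv track=rewrite | github.com/alexsalc03/DetectPhishingIS | Censys/scripts/feature_extractor_v3.py | tokenize_dns_names
-- ===== SOURCE A (Python) =====
-- def split_labels(name):
--     if not name:
--         return []
--     return [lbl for lbl in str(name).strip(".").lower().split(".") if lbl]
--
-- def tokenize_dns_names(dns_names):
--     """
--     Tokenizzazione semplice su separatori tipici.
--     """
--     tokens = []
--     for n in dns_names or []:
--         pieces = []
--         for label in split_labels(n):
--             pieces.extend(label.replace("_", "-").split("-"))
--         tokens.extend([p for p in pieces if p])
--     return tokens
-- ===== SOURCE B (Python) =====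
-- def tokenize_dns_names(dns_names):
--     """
--     Tokenizzazione semplice su separatori tipici.
--     Single character-level scan: collect maximal runs of non-separator
--     characters of each lowercased name (separators: '.', '_', '-').
--     """
--     tokens = []
--     for n in dns_names or []:
--         cur = []
--         for ch in str(n).lower():
--             if ch == '.' or ch == '_' or ch == '-':
--                 if cur:
--                     tokens.append(''.join(cur))
--                 cur = []
--             else:
--                 cur.append(ch)
--         if cur:
--             tokens.append(''.join(cur))
--     return tokens
-- ===== Notes on version B (the rewrite author's own statement) =====
-- stated objective: alternative
-- what changed: Replaces A's two-level split pipeline (strip '.', split on '.', then replace '_' with '-' and split on '-', filtering empties) with a single character-level scan over the lowercased name that emits maximal runs of non-separator characters.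
import Mathlib
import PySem

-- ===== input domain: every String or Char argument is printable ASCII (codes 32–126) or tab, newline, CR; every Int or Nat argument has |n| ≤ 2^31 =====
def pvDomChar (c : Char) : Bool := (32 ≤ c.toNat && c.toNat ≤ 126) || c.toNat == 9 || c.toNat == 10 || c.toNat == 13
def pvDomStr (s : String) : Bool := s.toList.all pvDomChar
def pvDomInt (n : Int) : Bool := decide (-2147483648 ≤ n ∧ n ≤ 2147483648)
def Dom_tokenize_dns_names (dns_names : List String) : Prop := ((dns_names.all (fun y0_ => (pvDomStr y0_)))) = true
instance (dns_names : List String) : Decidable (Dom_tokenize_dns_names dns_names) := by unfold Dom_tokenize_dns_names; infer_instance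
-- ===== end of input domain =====

-- B replaces A's two-level split pipeline (strip '.', split on '.', replace '_' by '-', split on '-',
-- filter empties) by a single character-level scan emitting maximal runs of non-separator characters
-- (objective: alternative decomposition, same cost).

-- ===== PORT A =====
def split_labels (name : String) : List String :=
  if name = "" then []
  else ((PySem.Str.split? (PySem.Str.lower (PySem.Str.stripChars name ".")) ".").getD []).filter
        (fun lbl => lbl != "")

def tokenize_dns_names (dns_names : List String) : List String :=
  dns_names.foldl (fun tokens n =>
    let pieces := (split_labels n).foldl
      (fun pieces label =>
        pieces ++ ((PySem.Str.split? (PySem.Str.replace label "_" "-") "-").getD [])) []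
    tokens ++ pieces.filter (fun p => p != "")) []

-- ===== PORT B =====
-- ''.join(cur) on a list of single characters is ported as String.ofList cur (exact).
def tokenize_dns_names_alt (dns_names : List String) : List String :=
  dns_names.foldl (fun tokens n =>
    let st := (PySem.Str.lower n).toList.foldl
      (fun (st : List String × List Char) ch =>
        if ch == '.' || ch == '_' || ch == '-' then
          (if st.2.isEmpty then st.1 else st.1 ++ [String.ofList st.2], [])
        else (st.1, st.2 ++ [ch])) (tokens, [])
    if st.2.isEmpty then st.1 else st.1 ++ [String.ofList st.2]) []

-- ===== PRECONDITION & SPEC =====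
def Spec_tokenize_dns_names (dns_names : List String) (out : List String) : Prop := out = tokenize_dns_names_alt dns_names
instance (dns_names : List String) (out : List String) : Decidable (Spec_tokenize_dns_names dns_names out) := by unfold Spec_tokenize_dns_names; infer_instance

-- ===== CLAIM (what is proved, stated in full; the proofs are below) =====
def Claim_equal_tokenize_dns_names : Prop := ∀ (dns_names : List String), Dom_tokenize_dns_names dns_names → Spec_tokenize_dns_names dns_names (tokenize_dns_names dns_names)

-- ===== LEMMAS AND PROOFS =====

def spP (p : Char → Bool) : List Char → List Char × List (List Char)
  | [] => ([], [])
  | c :: t =>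
      let s := spP p t
      if p c then ([], s.1 :: s.2) else (c :: s.1, s.2)

theorem spP_cons (p : Char → Bool) (c : Char) (t : List Char) :
    spP p (c :: t) = if p c then ([], (spP p t).1 :: (spP p t).2) else (c :: (spP p t).1, (spP p t).2) := by
  simp [spP]

theorem splitOn_go_single (d : Char) :
    ∀ (fuel : Nat) (l cur : List Char) (accL : List (List Char)), l.length ≤ fuel →
      PySem.Chars.splitOn.go [d] fuel l cur accL =
        accL.reverse ++ (cur.reverse ++ (spP (fun c => d == c) l).1) :: (spP (fun c => d == c) l).2 := by
  intro fuel
  induction fuel with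
  | zero =>
    intro l cur accL h
    have : l = [] := by cases l <;> simp_all
    subst this
    simp [PySem.Chars.splitOn.go, spP]
  | succ fuel ih =>
    intro l cur accL h
    cases l with
    | nil => simp [PySem.Chars.splitOn.go, spP]
    | cons c rest =>
      rw [PySem.Chars.splitOn.go]
      simp only [List.length_cons] at h
      by_cases hd : (d == c) = true
      · rw [if_pos (by simp [List.isPrefixOf, hd])]
        rw [ih _ _ _ (by simpa using h)]
        rw [spP_cons]
        simp [hd]
      · rw [if_neg (by simp [List.isPrefixOf, hd])]
        rw [ih _ _ _ (by simpa using h)]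
        rw [spP_cons]
        simp [hd]

theorem splitOn_single (cs : List Char) (d : Char) :
    PySem.Chars.splitOn cs [d] = (spP (fun c => d == c) cs).1 :: (spP (fun c => d == c) cs).2 := by
  rw [PySem.Chars.splitOn, splitOn_go_single d _ _ _ _ (by omega)]
  simp

def subU (c : Char) : Char := if c == '_' then '-' else c

theorem replace_go_single :
    ∀ (fuel : Nat) (l acc : List Char), l.length ≤ fuel →
      PySem.Chars.replace.go ['_'] ['-'] fuel l acc = acc.reverse ++ l.map subU := by
  intro fuel
  induction fuel with
  | zero =>
    intro l acc h
    have : l = [] := by cases l <;> simp_all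
    subst this
    simp [PySem.Chars.replace.go]
  | succ fuel ih =>
    intro l acc h
    cases l with
    | nil => simp [PySem.Chars.replace.go]
    | cons c rest =>
      rw [PySem.Chars.replace.go]
      simp only [List.length_cons] at h
      by_cases hc : (c == '_') = true
      · rw [if_pos (by have hc' : c = '_' := by simpa using hc
                       subst hc'; simp [List.isPrefixOf])]
        rw [ih _ _ (by simpa using h)]
        simp [subU, hc]
      · rw [if_neg (by simp only [List.isPrefixOf_iff_prefix, List.cons_prefix_cons]
                       intro hcon
                       exact absurd hcon.1.symm (by simpa using hc))]
        rw [ih _ _ (by simpa using h)]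
        simp [subU, hc]

theorem replace_single (l : List Char) :
    PySem.Chars.replace l ['_'] ['-'] = l.map subU := by
  rw [PySem.Chars.replace]
  simp only [List.isEmpty_cons, if_neg]
  rw [replace_go_single _ _ _ (by omega)]
  simp

theorem spP_map (p : Char → Bool) (f : Char → Char) (l : List Char) :
    spP p (l.map f) = ((spP (fun c => p (f c)) l).1.map f, (spP (fun c => p (f c)) l).2.map (List.map f)) := by
  induction l with
  | nil => simp [spP]
  | cons c t ih =>
    simp only [List.map_cons, spP_cons, ih]
    by_cases h : p (f c) = true <;> simp [h]

theorem spP_no_sep (q : Char → Bool) (l : List Char) :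
    (∀ c ∈ (spP q l).1, q c = false) ∧ (∀ piece ∈ (spP q l).2, ∀ c ∈ piece, q c = false) := by
  induction l with
  | nil => simp [spP]
  | cons c t ih =>
    rw [spP_cons]
    by_cases h : q c = true
    · simp only [h, if_pos rfl]
      constructor
      · simp
      · intro piece hp
        rcases List.mem_cons.mp hp with h1 | h1
        · subst h1; exact ih.1
        · exact ih.2 piece h1
    · simp only [h]
      rw [if_neg (by simp_all)]
      refine ⟨?_, ih.2⟩
      intro c' hc'
      rcases List.mem_cons.mp hc' with h1 | h1
      · subst h1; simpa using h
      · exact ih.1 c' h1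

def runsP (p : Char → Bool) (cs : List Char) : List (List Char) :=
  (((spP p cs).1 :: (spP p cs).2).filter (fun x => x != []))

theorem spP_head_or (p q : Char → Bool) (t : List Char) :
    (spP q (spP p t).1).1 = (spP (fun c => p c || q c) t).1 := by
  induction t with
  | nil => simp [spP]
  | cons c t ih =>
    rw [spP_cons, spP_cons (fun c => p c || q c)]
    by_cases hp : p c = true
    · simp [hp, spP]
    · by_cases hq : q c = true
      · simp [hp, hq, spP_cons]
      · simp [hp, hq, spP_cons, ih]

theorem runsP_cons_pos (p : Char → Bool) (c : Char) (t : List Char) (h : p c = true) :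
    runsP p (c :: t) = runsP p t := by
  simp [runsP, spP_cons, h]

theorem runsP_cons_neg (p : Char → Bool) (c : Char) (t : List Char) (h : ¬ p c = true) :
    runsP p (c :: t) = (c :: (spP p t).1) :: (spP p t).2.filter (fun x => x != []) := by
  simp [runsP, spP_cons, h]

theorem runsP_nil (p : Char → Bool) : runsP p [] = [] := by simp [runsP, spP]

theorem runsP_comp (p q : Char → Bool) (cs : List Char) :
    ((spP p cs).1 :: (spP p cs).2).flatMap (runsP q) = runsP (fun c => p c || q c) cs := by
  induction cs with
  | nil => simp [spP, runsP]
  | cons c t ih =>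
    by_cases hp : p c = true
    · rw [spP_cons, if_pos hp, runsP_cons_pos _ _ _ (by simp [hp])]
      rw [List.flatMap_cons, runsP_nil, List.nil_append]
      exact ih
    · by_cases hq : q c = true
      · rw [spP_cons, if_neg hp, runsP_cons_pos _ _ _ (by simp [hp, hq])]
        rw [List.flatMap_cons, runsP_cons_pos _ _ _ hq]
        rw [List.flatMap_cons] at ih
        rw [runsP] at ih ⊢
        exact ih
      · rw [spP_cons, if_neg hp, runsP_cons_neg _ _ _ (by simp [hp, hq])]
        rw [List.flatMap_cons, runsP_cons_neg _ _ _ hq]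
        rw [List.flatMap_cons] at ih
        rw [runsP, runsP] at ih
        rw [spP_head_or p q t]
        rw [spP_head_or p q t] at ih
        set g := (spP (fun c => p c || q c) t).1 with hgdef
        by_cases hg : g = []
        · rw [hg] at ih ⊢
          simp only [List.filter_cons] at ih ⊢
          norm_num at ih ⊢
          exact ih
        · simp only [List.filter_cons] at ih ⊢
          rw [if_pos (by simpa using hg), if_pos (by simpa using hg)] at ih
          rw [List.cons_append] at ih
          have := List.cons.injEq g _ g _ |>.mp ih
          rw [List.cons_append, this.2]

theorem runsP_sep_prefix (p : Char → Bool) (pre : List Char) (h : ∀ c ∈ pre, p c = true) :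
    ∀ l : List Char, runsP p (pre ++ l) = runsP p l := by
  induction pre with
  | nil => intro l; rfl
  | cons c rest ih =>
    intro l
    rw [List.cons_append, runsP_cons_pos _ _ _ (h c (by simp))]
    exact ih (fun c hc => h c (by simp [hc])) l

theorem spP_sep_last (p : Char → Bool) (c : Char) (hc : p c = true) :
    ∀ l : List Char, (spP p (l ++ [c])).1 = (spP p l).1 ∧
      (spP p (l ++ [c])).2.filter (fun x => x != []) = (spP p l).2.filter (fun x => x != []) := by
  intro l
  induction l with
  | nil => simp [spP, spP_cons, hc]
  | cons d t ih =>
    rw [List.cons_append, spP_cons, spP_cons p d t]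
    by_cases hd : p d = true
    · rw [if_pos hd, if_pos hd]
      refine ⟨rfl, ?_⟩
      simp only [List.filter_cons, ih.1, ih.2]
    · rw [if_neg hd, if_neg hd]
      exact ⟨by simp [ih.1], ih.2⟩

theorem runsP_sep_last (p : Char → Bool) (c : Char) (hc : p c = true) (l : List Char) :
    runsP p (l ++ [c]) = runsP p l := by
  rw [runsP, runsP]
  simp only [List.filter_cons, (spP_sep_last p c hc l).1, (spP_sep_last p c hc l).2]

theorem runsP_sep_suffix (p : Char → Bool) (post : List Char) (h : ∀ c ∈ post, p c = true) :
    ∀ l : List Char, runsP p (l ++ post) = runsP p l := by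
  induction post with
  | nil => intro l; simp
  | cons c rest ih =>
    intro l
    have : l ++ c :: rest = (l ++ [c]) ++ rest := by simp
    rw [this, ih (fun c hc => h c (by simp [hc])) (l ++ [c]),
        runsP_sep_last p c (h c (by simp)) l]

theorem ofList_ne_empty (x : List Char) : (String.ofList x != "") = (x != []) := by
  by_cases h : x = []
  · subst h; rfl
  · have hne : String.ofList x ≠ "" := by
      intro hc
      exact h (by simpa using congrArg String.toList hc)
    have h1 : (String.ofList x != "") = true := by simpa [bne_iff_ne] using hne
    have h2 : (x != []) = true := by simpa [bne_iff_ne] using h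
    rw [h1, h2]

def pqB (c : Char) : Bool := c == '.' || c == '_' || c == '-'

def stepB (st : List String × List Char) (ch : Char) : List String × List Char :=
  if ch == '.' || ch == '_' || ch == '-' then
    (if st.2.isEmpty then st.1 else st.1 ++ [String.ofList st.2], [])
  else (st.1, st.2 ++ [ch])

theorem tokensB_eq (cs : List Char) : ∀ (tokens : List String) (cur : List Char),
    (if (cs.foldl stepB (tokens, cur)).2.isEmpty = true then (cs.foldl stepB (tokens, cur)).1
     else (cs.foldl stepB (tokens, cur)).1 ++ [String.ofList (cs.foldl stepB (tokens, cur)).2])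
    = tokens ++ (((cur ++ (spP pqB cs).1) :: (spP pqB cs).2).filter (fun x => x != [])).map String.ofList := by
  induction cs with
  | nil =>
    intro tokens cur
    simp only [List.foldl_nil, spP]
    by_cases h : cur = []
    · subst h; simp
    · simp [List.filter_cons, h, List.isEmpty_iff]
  | cons c t ih =>
    intro tokens cur
    simp only [List.foldl_cons]
    by_cases hc : pqB c = true
    · have hc' : (c == '.' || c == '_' || c == '-') = true := hc
      rw [spP_cons, if_pos hc, show stepB (tokens, cur) c =
          (if cur.isEmpty then tokens else tokens ++ [String.ofList cur], []) from by
            unfold stepB; rw [hc']; simp]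
      by_cases hcur : cur = []
      · rw [show (if cur.isEmpty = true then tokens else tokens ++ [String.ofList cur]) = tokens from by
            simp [hcur]]
        rw [ih tokens []]
        simp [hcur]
      · rw [show (if cur.isEmpty = true then tokens else tokens ++ [String.ofList cur]) =
            tokens ++ [String.ofList cur] from by simp [List.isEmpty_iff, hcur]]
        rw [ih (tokens ++ [String.ofList cur]) []]
        have hfc : List.filter (fun x => x != []) ((cur ++ []) :: (spP pqB t).1 :: (spP pqB t).2)
            = cur :: List.filter (fun x => x != []) ((spP pqB t).1 :: (spP pqB t).2) := by
          rw [List.append_nil, List.filter_cons, if_pos (by simpa [bne_iff_ne] using hcur)]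
        rw [hfc]
        simp
    · have hc' : (c == '.' || c == '_' || c == '-') = false := Bool.eq_false_iff.mpr hc
      rw [spP_cons, if_neg (by simp [hc] : ¬ pqB c = true), show stepB (tokens, cur) c = (tokens, cur ++ [c]) from by
            unfold stepB; rw [hc']; simp]
      rw [ih tokens (cur ++ [c])]
      simp

theorem flatMap_filter_ne_nil (f : List Char → List (List Char)) (hf : f [] = [])
    (xs : List (List Char)) :
    (xs.filter (fun x => x != [])).flatMap f = xs.flatMap f := by
  induction xs with
  | nil => rfl
  | cons x t ih =>
    by_cases h : x = []
    · subst h; simp [hf, ih]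
    · rw [List.filter_cons, if_pos (by simpa [bne_iff_ne] using h),
          List.flatMap_cons, List.flatMap_cons, ih]

theorem pq_split : (fun c => ('.' == c) || ('-' == subU c)) = pqB := by
  funext c
  by_cases h1 : c = '.'
  · subst h1; decide
  by_cases h2 : c = '_'
  · subst h2; decide
  by_cases h3 : c = '-'
  · subst h3; decide
  have e1 : ('.' == c) = false := by simpa using (Ne.symm h1)
  have hsub : subU c = c := by simp [subU, h2]
  have e2 : (c == '_') = false := by simpa using h2
  have e3 : ('-' == c) = false := by simpa using (Ne.symm h3)
  simp [pqB, hsub, e1, e2, e3, show (c == '.') = false from by simpa using h1,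
        show (c == '-') = false from by simpa using h3]

theorem subU_eq_self_of_not_dash {c : Char} (h : ('-' == subU c) = false) : subU c = c := by
  by_cases hc : c = '_'
  · subst hc; simp [subU] at h
  · simp [subU, hc]

theorem filter_map_ofList (xs : List (List Char)) :
    ((xs.map String.ofList).filter (fun s => s != "")) = (xs.filter (fun x => x != [])).map String.ofList := by
  rw [List.filter_map]
  congr 1
  apply List.filter_congr
  intro x _
  simpa using ofList_ne_empty x

theorem runsP_map_subU (piece : List Char) :
    (((spP (fun c => '-' == c) (piece.map subU)).1 :: (spP (fun c => '-' == c) (piece.map subU)).2).filter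
      (fun x => x != [])) = runsP (fun c => '-' == subU c) piece := by
  have hm := spP_map (fun c => '-' == c) subU piece
  rw [runsP, hm]
  have hnq := spP_no_sep (fun c => '-' == subU c) piece
  have h1 : (spP (fun c => '-' == subU c) piece).1.map subU = (spP (fun c => '-' == subU c) piece).1 := by
    rw [show (spP (fun c => '-' == subU c) piece).1.map subU
        = (spP (fun c => '-' == subU c) piece).1.map id from
      List.map_congr_left (fun c hc => subU_eq_self_of_not_dash (hnq.1 c hc)), List.map_id]
  have h2 : (spP (fun c => '-' == subU c) piece).2.map (List.map subU) = (spP (fun c => '-' == subU c) piece).2 := by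
    rw [show (spP (fun c => '-' == subU c) piece).2.map (List.map subU)
        = (spP (fun c => '-' == subU c) piece).2.map id from
      List.map_congr_left (fun pc hpc => by
        rw [show pc.map subU = pc.map id from
          List.map_congr_left (fun c hc => subU_eq_self_of_not_dash (hnq.2 pc hpc c hc)), List.map_id]
        rfl), List.map_id]
  rw [h1, h2]

theorem tokensA_label (piece : List Char) :
    (((PySem.Str.split? (PySem.Str.replace (String.ofList piece) "_" "-") "-").getD []).filter
      (fun p => p != "")) = (runsP (fun c => '-' == subU c) piece).map String.ofList := by
  rw [PySem.Str.replace]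
  rw [show (String.ofList piece).toList = piece from String.toList_ofList]
  rw [show "_".toList = ['_'] from rfl, show "-".toList = ['-'] from rfl]
  rw [replace_single]
  rw [PySem.Str.split?]
  rw [show (String.ofList (piece.map subU)).toList = piece.map subU from String.toList_ofList]
  rw [show PySem.Chars.split? (piece.map subU) "-".toList
      = some (PySem.Chars.splitOn (piece.map subU) ['-']) from by simp [PySem.Chars.split?]]
  rw [splitOn_single]
  simp only [Option.map_some, Option.getD_some]
  rw [filter_map_ofList, runsP_map_subU]


theorem split_labels_eq (n : String) (h : ¬ n = "") :
    split_labels n = (runsP (fun c => '.' == c)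
      (PySem.Chars.lower (PySem.Chars.stripChars n.toList ['.']))).map String.ofList := by
  rw [split_labels, if_neg h]
  rw [PySem.Str.lower, PySem.Str.stripChars]
  rw [show ".".toList = ['.'] from rfl]
  rw [show (String.ofList (PySem.Chars.stripChars n.toList ['.'])).toList
      = PySem.Chars.stripChars n.toList ['.'] from String.toList_ofList]
  rw [PySem.Str.split?]
  rw [show (String.ofList (PySem.Chars.lower (PySem.Chars.stripChars n.toList ['.']))).toList
      = PySem.Chars.lower (PySem.Chars.stripChars n.toList ['.']) from String.toList_ofList]
  rw [show PySem.Chars.split? (PySem.Chars.lower (PySem.Chars.stripChars n.toList ['.'])) ".".toList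
      = some (PySem.Chars.splitOn (PySem.Chars.lower (PySem.Chars.stripChars n.toList ['.'])) ['.']) from by
        simp [PySem.Chars.split?]]
  rw [splitOn_single]
  simp only [Option.map_some, Option.getD_some]
  rw [filter_map_ofList]
  rfl

theorem lowerChar_dot (c : Char) (h : (['.'].contains c) = true) :
    PySem.Chars.lowerChar c = '.' := by
  have : c = '.' := by simpa using h
  subst this; decide

theorem runsP_lower_strip (s : List Char) :
    runsP pqB (PySem.Chars.lower (PySem.Chars.stripChars s ['.']))
      = runsP pqB (PySem.Chars.lower s) := by
  have hstrip : PySem.Chars.stripChars s ['.']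
      = (List.dropWhile (fun c => (['.'].contains c)) (List.dropWhile (fun c => (['.'].contains c)) s).reverse).reverse := by
    simp [PySem.Chars.stripChars]
  set p : Char → Bool := fun c => (['.'].contains c) with hp
  set u := List.dropWhile p s with hu
  have hs : s = s.takeWhile p ++ u := (List.takeWhile_append_dropWhile).symm
  have hu2 : u = (List.dropWhile p u.reverse).reverse ++ (List.takeWhile p u.reverse).reverse := by
    have h0 : u.reverse.takeWhile p ++ u.reverse.dropWhile p = u.reverse := List.takeWhile_append_dropWhile
    have h1 := congrArg List.reverse h0
    rw [List.reverse_append, List.reverse_reverse] at h1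
    exact h1.symm
  have hdotsep : ∀ c : Char, p c = true → pqB (PySem.Chars.lowerChar c) = true := by
    intro c hc
    rw [lowerChar_dot c hc]; decide
  calc runsP pqB (PySem.Chars.lower (PySem.Chars.stripChars s ['.']))
      = runsP pqB (PySem.Chars.lower u) := by
        conv_rhs => rw [hu2]
        rw [PySem.Chars.lower, PySem.Chars.lower, List.map_append]
        rw [runsP_sep_suffix pqB _ (by
          intro c hc
          rcases List.mem_map.mp hc with ⟨c', hc', rfl⟩
          exact hdotsep c' (List.mem_takeWhile_imp (List.mem_reverse.mp hc'))) _]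
        rw [hstrip]
    _ = runsP pqB (PySem.Chars.lower s) := by
        conv_rhs => rw [hs]
        rw [PySem.Chars.lower, PySem.Chars.lower, List.map_append]
        rw [runsP_sep_prefix pqB _ (by
          intro c hc
          rcases List.mem_map.mp hc with ⟨c', hc', rfl⟩
          exact hdotsep c' (List.mem_takeWhile_imp hc')) _]

theorem tokensA_eq (n : String) :
    (((split_labels n).foldl
      (fun pieces label =>
        pieces ++ ((PySem.Str.split? (PySem.Str.replace label "_" "-") "-").getD [])) []).filter
        (fun p => p != ""))
    = (runsP pqB (PySem.Chars.lower n.toList)).map String.ofList := by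
  by_cases h : n = ""
  · subst h
    simp [split_labels, runsP, spP, PySem.Chars.lower]
  · rw [PySem.List.foldl_append_eq_flatMap, List.nil_append]
    rw [List.filter_flatMap]
    rw [split_labels_eq n h]
    rw [List.flatMap_map]
    rw [List.flatMap_congr (fun piece _ => tokensA_label piece)]
    rw [← List.map_flatMap]
    rw [runsP]
    rw [flatMap_filter_ne_nil _ (runsP_nil _) _]
    rw [runsP_comp]
    rw [show (fun c => ('.' == c) || ('-' == subU c)) = pqB from pq_split]
    rw [runsP_lower_strip n.toList]

theorem tokenize_eq (dns_names : List String) :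
    tokenize_dns_names dns_names = tokenize_dns_names_alt dns_names := by
  rw [tokenize_dns_names, tokenize_dns_names_alt]
  apply PySem.List.foldl_congr_mem
  intro tokens n _
  show tokens ++ _ = _
  have hB := tokensB_eq (PySem.Str.lower n).toList tokens []
  have hcs : (PySem.Str.lower n).toList = PySem.Chars.lower n.toList := by
    rw [PySem.Str.lower, String.toList_ofList]
  rw [hcs] at hB
  calc tokens ++ ((split_labels n).foldl
        (fun pieces label =>
          pieces ++ ((PySem.Str.split? (PySem.Str.replace label "_" "-") "-").getD [])) []).filter
          (fun p => p != "")
      = tokens ++ (runsP pqB (PySem.Chars.lower n.toList)).map String.ofList := by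
        rw [tokensA_eq]
    _ = _ := by
        rw [List.nil_append] at hB
        rw [show List.filter (fun x => x != [])
            ((spP pqB (PySem.Chars.lower n.toList)).1 :: (spP pqB (PySem.Chars.lower n.toList)).2)
            = runsP pqB (PySem.Chars.lower n.toList) from rfl] at hB
        rw [← hB, hcs]
        rfl

-- ===== VERDICT (by name: the statement is the Claim_ definition above) =====
theorem tokenize_dns_names_spec : Claim_equal_tokenize_dns_names := by
  intro dns_names _
  unfold Spec_tokenize_dns_names
  exact tokenize_eq dns_names
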